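-- pv_equiv track=rewrite | github.com/ppddddpp/multi-modal-retrieval-predict-project | src/Evaluate/kg_probe.py | find_name_indices
-- ===== SOURCE A (Python) =====
-- def find_name_indices(names, query, topn=10):
--     """Find indices matching query (exact or substring, case-insensitive)."""
--     q = query.lower()
--     idxs = [i for i, n in enumerate(names) if q == n.lower()]
--     if idxs:
--         return idxs
--     idxs = [i for i, n in enumerate(names) if q in n.lower()]
--     if idxs:
--         return idxs[:topn]
--     idxs = [i for i, n in enumerate(names) if any(w == q for w in n.lower().split())]
--     return idxs[:topn]
-- ===== SOURCE B (Python) =====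
-- def find_name_indices(names, query, topn=10):
--     """Find indices matching query (exact or substring, case-insensitive)."""
--     q = query.lower()
--     exact, sub, word = [], [], []
--     for i, n in enumerate(names):
--         low = n.lower()
--         if q == low:
--             exact.append(i)
--         if q in low:
--             sub.append(i)
--         if q in low.split():
--             word.append(i)
--     if exact:
--         return exact
--     if sub:
--         return sub[:topn]
--     return word[:topn]
-- ===== Notes on version B (the rewrite author's own statement) =====
-- stated objective: faster
-- what changed: Single pass over enumerate(names) lowercasing each name once and filling three priority buckets (exact/substring/word), then dispatching by priority, instead of up to three separate comprehensions each re-lowercasing every name.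
import Mathlib
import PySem

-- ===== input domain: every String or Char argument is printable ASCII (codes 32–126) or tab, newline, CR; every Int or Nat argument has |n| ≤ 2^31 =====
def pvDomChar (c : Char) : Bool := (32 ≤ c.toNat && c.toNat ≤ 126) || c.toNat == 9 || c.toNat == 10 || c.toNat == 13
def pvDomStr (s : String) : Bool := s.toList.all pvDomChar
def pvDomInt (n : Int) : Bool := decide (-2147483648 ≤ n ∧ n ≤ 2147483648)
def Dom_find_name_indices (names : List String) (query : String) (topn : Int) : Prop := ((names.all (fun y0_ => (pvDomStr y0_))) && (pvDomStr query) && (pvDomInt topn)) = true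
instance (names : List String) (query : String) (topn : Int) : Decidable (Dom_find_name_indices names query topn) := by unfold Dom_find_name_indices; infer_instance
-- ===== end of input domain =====

-- B does the same job in one pass: each name is lowercased once and its index is appended
-- to the exact/substring/word buckets it qualifies for; B then dispatches by priority.

-- ===== PORT A =====
def find_name_indices (names : List String) (query : String) (topn : Int) : List Int :=
  let q := PySem.Str.lower query
  let idxs := (PySem.List.enumerate names 0).filterMap
    (fun p => if q == PySem.Str.lower p.2 then some p.1 else none)
  if idxs ≠ [] then idxs
  else
    let idxs := (PySem.List.enumerate names 0).filterMap
      (fun p => if PySem.Str.isIn q (PySem.Str.lower p.2) then some p.1 else none)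
    if idxs ≠ [] then PySem.List.slice idxs none (some topn)
    else
      let idxs := (PySem.List.enumerate names 0).filterMap
        (fun p => if (PySem.Str.split₀ (PySem.Str.lower p.2)).any (fun w => w == q) then some p.1 else none)
      PySem.List.slice idxs none (some topn)

-- ===== PORT B =====
-- one loop-body step: update the three buckets for element p = (index, name)
def bStep (q : String) (acc : List Int × List Int × List Int) (p : Int × String) :
    List Int × List Int × List Int :=
  let low := PySem.Str.lower p.2
  let acc := if q == low then (acc.1 ++ [p.1], acc.2.1, acc.2.2) else acc
  let acc := if PySem.Str.isIn q low then (acc.1, acc.2.1 ++ [p.1], acc.2.2) else acc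
  if (PySem.Str.split₀ low).contains q then (acc.1, acc.2.1, acc.2.2 ++ [p.1]) else acc

def find_name_indices_alt (names : List String) (query : String) (topn : Int) : List Int :=
  let q := PySem.Str.lower query
  let r := (PySem.List.enumerate names 0).foldl (bStep q) ([], [], [])
  if r.1 ≠ [] then r.1
  else if r.2.1 ≠ [] then PySem.List.slice r.2.1 none (some topn)
  else PySem.List.slice r.2.2 none (some topn)

-- ===== PRECONDITION & SPEC =====
def Spec_find_name_indices (names : List String) (query : String) (topn : Int) (out : List Int) : Prop := out = find_name_indices_alt names query topn
instance (names : List String) (query : String) (topn : Int) (out : List Int) : Decidable (Spec_find_name_indices names query topn out) := by unfold Spec_find_name_indices; infer_instance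

-- ===== CLAIM (what is proved, stated in full; the proofs are below) =====
def Claim_equal_find_name_indices : Prop := ∀ (names : List String) (query : String) (topn : Int), Dom_find_name_indices names query topn → Spec_find_name_indices names query topn (find_name_indices names query topn)

-- ===== LEMMAS AND PROOFS =====

theorem bStep_eq (q : String) (acc : List Int × List Int × List Int) (p : Int × String) :
    bStep q acc p =
      ((if q == PySem.Str.lower p.2 then acc.1 ++ [p.1] else acc.1),
       (if PySem.Str.isIn q (PySem.Str.lower p.2) then acc.2.1 ++ [p.1] else acc.2.1),
       (if (PySem.Str.split₀ (PySem.Str.lower p.2)).contains q then acc.2.2 ++ [p.1] else acc.2.2)) := by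
  obtain ⟨e, s, w⟩ := acc
  simp only [bStep]
  split_ifs <;> rfl

-- the one-pass fold fills exactly the three filtered index lists
theorem foldl_bStep (q : String) (l : List (Int × String)) :
    ∀ (e s w : List Int),
      l.foldl (bStep q) (e, s, w)
        = (e ++ l.filterMap (fun p => if q == PySem.Str.lower p.2 then some p.1 else none),
           s ++ l.filterMap (fun p => if PySem.Str.isIn q (PySem.Str.lower p.2) then some p.1 else none),
           w ++ l.filterMap (fun p => if (PySem.Str.split₀ (PySem.Str.lower p.2)).contains q then some p.1 else none)) := by
  induction l with
  | nil => intro e s w; simp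
  | cons p l ih =>
      intro e s w
      simp only [List.foldl_cons, List.filterMap_cons, bStep_eq]
      rw [ih]
      split_ifs <;> simp

-- 'q in low.split()' (B) and 'any(w == q …)' (A) are the same test
theorem contains_eq_any (l : List String) (q : String) :
    l.contains q = l.any (fun w => w == q) := by
  induction l with
  | nil => rfl
  | cons x l ih =>
      simp only [List.contains_cons, List.any_cons, ih]
      congr 1
      exact BEq.comm ..

-- ===== VERDICT (by name: the statement is the Claim_ definition above) =====
theorem find_name_indices_spec : Claim_equal_find_name_indices := by
  intro names query topn _
  simp only [Spec_find_name_indices, find_name_indices, find_name_indices_alt]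
  rw [foldl_bStep]
  simp only [List.nil_append]
  have hw : (PySem.List.enumerate names 0).filterMap
      (fun p => if (PySem.Str.split₀ (PySem.Str.lower p.2)).contains (PySem.Str.lower query) then some p.1 else none)
    = (PySem.List.enumerate names 0).filterMap
      (fun p => if (PySem.Str.split₀ (PySem.Str.lower p.2)).any (fun w => w == PySem.Str.lower query) then some p.1 else none) := by
    apply List.filterMap_congr
    intro p _
    rw [contains_eq_any]
  rw [hw]
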